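-- pv_equiv track=rewrite | github.com/richtwin567/COMP3161-Final-Project | server/db/sql_generator.py | generate_meal_plans
-- ===== SOURCE A (Python) =====
-- def quote_string(string):
--     """
--     Surrounds a string in single quotes
--     """
--     return f"""'{string}'"""
--
-- def insert_all(table_name, values):
--     """
--     Creates a single statement to insert multiple records
--
--     Args:
--         table_name(str):
--             The name of the table to insert into
--
--         values(list[list[str]]):
--             The list of value lists to insert
--
--     Returns:
--         str: The insert statement
--     """
--     str_values = []
--     list_str_values = []
--
--     for value_list in values:
--         for value in value_list:
--             str_value = str(value) if not type(
--                 value) is str else quote_string(value)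
--             str_values.append(str_value)
--         list_str_values.append(", ".join(str_values))
--         str_values = []
--
--     list_str_values = "),\n\t(".join(list_str_values)
--
--     return f"""
-- INSERT INTO {table_name} VALUES
--     ({list_str_values});
-- """
--
-- CAP = 100000
--
-- def generate_meal_plans(no_users):
--     """
--     Creates the insert queries for the meal_plan table
--
--     Args:
--         no_users(int):
--             The number of users in the database
--
--     Returns:
--         str: The insert statement
--     """
--
--     value_lists = []
--     batch = []
--     for id in range(1, no_users+1):
--         value_lists.append([id, id])
--
--         if len(value_lists) % CAP == 0:
--             insert_statement = insert_all("meal_plan", value_lists)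
--             value_lists = []
--             batch.append(insert_statement)
--
--     if value_lists:
--         insert_statement = insert_all("meal_plan", value_lists)
--         value_lists = []
--         batch.append(insert_statement)
--
--     return batch
-- ===== SOURCE B (Python) =====
-- CAP = 100000
--
--
-- def _chunk_stmt(no_users, start):
--     end = min(start + CAP, no_users + 1)
--     body = "),\n\t(".join("{0}, {0}".format(i) for i in range(start, end))
--     return "\nINSERT INTO meal_plan VALUES\n    ({0});\n".format(body)
--
--
-- def generate_meal_plans(no_users):
--     return [_chunk_stmt(no_users, start) for start in range(1, no_users + 1, CAP)]
-- ===== Notes on version B (the rewrite author's own statement) =====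
-- stated objective: alternative
-- what changed: Replaces A's accumulate-and-flush loop (appending [id,id] rows and flushing on a len%CAP condition via the generic insert_all string builder) with precomputed chunk boundaries: one pass over the chunk-start range with step CAP that renders each batch's statement directly from its id range.
import Mathlib
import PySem

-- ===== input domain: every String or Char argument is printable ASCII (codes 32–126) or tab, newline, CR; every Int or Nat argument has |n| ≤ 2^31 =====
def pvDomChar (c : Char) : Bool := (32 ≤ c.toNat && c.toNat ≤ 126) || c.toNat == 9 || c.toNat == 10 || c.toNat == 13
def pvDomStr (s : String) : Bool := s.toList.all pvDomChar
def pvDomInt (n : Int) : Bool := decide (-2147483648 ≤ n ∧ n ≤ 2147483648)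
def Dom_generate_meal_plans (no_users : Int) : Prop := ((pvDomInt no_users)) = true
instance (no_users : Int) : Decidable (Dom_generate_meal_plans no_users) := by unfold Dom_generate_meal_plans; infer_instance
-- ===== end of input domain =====

-- B replaces A's accumulate-and-flush batching with precomputed chunk boundaries (alternative decomposition, same cost).

-- ===== PORT A =====
-- insert_all, specialized to the int value lists this module passes it
-- (`type(value) is str` is False for every int, so the str branch always takes str(value)).
def insert_all (table_name : String) (values : List (List Int)) : String :=
  let list_str_values := values.foldl
    (fun (lsv : List String) value_list =>
      let str_values := value_list.foldl (fun (sv : List String) v => sv ++ [PySem.Int.toStr v]) []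
      lsv ++ [PySem.Str.join ", " str_values]) []
  let joined := PySem.Str.join "),\n\t(" list_str_values
  "\nINSERT INTO " ++ table_name ++ " VALUES\n    (" ++ joined ++ ");\n"

-- one iteration of A's for-loop over id
def genStep (st : List (List Int) × List String) (id : Int) : List (List Int) × List String :=
  let value_lists := st.1 ++ [[id, id]]
  if value_lists.length % 100000 == 0 then
    ([], st.2 ++ [insert_all "meal_plan" value_lists])
  else (value_lists, st.2)

def generate_meal_plans (no_users : Int) : List String :=
  let st := (PySem.List.pyRange 1 (no_users + 1) 1).foldl genStep ([], [])
  if st.1.isEmpty then st.2 else st.2 ++ [insert_all "meal_plan" st.1]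

-- ===== PORT B =====
def chunk_stmt (no_users start : Int) : String :=
  let e := min (start + 100000) (no_users + 1)
  let body := PySem.Str.join "),\n\t("
    ((PySem.List.pyRange start e 1).map (fun i => PySem.Int.toStr i ++ ", " ++ PySem.Int.toStr i))
  "\nINSERT INTO meal_plan VALUES\n    (" ++ body ++ ");\n"

def generate_meal_plans_alt (no_users : Int) : List String :=
  (PySem.List.pyRange 1 (no_users + 1) 100000).map (chunk_stmt no_users)

-- ===== PRECONDITION & SPEC =====
def Spec_generate_meal_plans (no_users : Int) (out : List String) : Prop := out = generate_meal_plans_alt no_users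
instance (no_users : Int) (out : List String) : Decidable (Spec_generate_meal_plans no_users out) := by unfold Spec_generate_meal_plans; infer_instance

-- ===== CLAIM (what is proved, stated in full; the proofs are below) =====
def Claim_equal_generate_meal_plans : Prop := ∀ (no_users : Int), Dom_generate_meal_plans no_users → Spec_generate_meal_plans no_users (generate_meal_plans no_users)

-- ===== LEMMAS AND PROOFS =====

-- the buffered value lists for ids s..a-1
def pvPairs (s a : Int) : List (List Int) := (PySem.List.pyRange s a 1).map (fun i => [i, i])

-- A's final flush after the loop
def pvFlush (st : List (List Int) × List String) : List String :=
  if st.1.isEmpty then st.2 else st.2 ++ [insert_all "meal_plan" st.1]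

lemma pyRange_nil_pos (a b s : Int) (hs : 0 < s) (h : b ≤ a) :
    PySem.List.pyRange a b s = [] := by
  rw [PySem.List.pyRange_of_pos _ _ hs, if_neg (by omega)]
  simp

lemma pyRange_cons_pos (a b s : Int) (hs : 0 < s) (hab : a < b) :
    PySem.List.pyRange a b s = a :: PySem.List.pyRange (a + s) b s := by
  rw [PySem.List.pyRange_of_pos _ _ hs, PySem.List.pyRange_of_pos _ _ hs, if_pos hab]
  have hd : (b - a + s - 1) / s = (b - a - 1) / s + 1 := by
    rw [show b - a + s - 1 = (b - a - 1) + 1 * s by ring, Int.add_mul_ediv_right _ _ hs.ne']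
  have hnn : 0 ≤ (b - a - 1) / s := Int.ediv_nonneg (by omega) (by omega)
  by_cases h2 : a + s < b
  · rw [if_pos h2]
    have hsub : b - (a + s) + s - 1 = b - a - 1 := by ring
    rw [hsub]
    have : ((b - a + s - 1) / s).toNat = ((b - a - 1) / s).toNat + 1 := by omega
    rw [this, List.range_succ_eq_map, List.map_cons, List.map_map]
    congr 1
    · simp
    · apply List.map_congr_left
      intro k _
      simp [Function.comp]
      ring
  · rw [if_neg h2]
    have hz : (b - a - 1) / s = 0 := Int.ediv_eq_zero_of_lt (by omega) (by omega)
    have : ((b - a + s - 1) / s).toNat = 1 := by omega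
    rw [this]
    simp

lemma join_pair (x y : String) : PySem.Str.join ", " [x, y] = x ++ ", " ++ y := by
  apply String.toList_inj.mp
  simp [PySem.Str.join, PySem.Chars.join_cons_cons, PySem.Chars.join_singleton]

lemma foldl_append_map {α β : Type} (f : α → β) (l : List α) (init : List β) :
    l.foldl (fun acc x => acc ++ [f x]) init = init ++ l.map f := by
  induction l generalizing init with
  | nil => simp
  | cons x xs ih => simp [List.foldl_cons, ih]

lemma insert_all_pairs (s e : Int) :
    insert_all "meal_plan" (pvPairs s e)
      = "\nINSERT INTO meal_plan VALUES\n    (" ++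
        PySem.Str.join "),\n\t("
          ((PySem.List.pyRange s e 1).map (fun i => PySem.Int.toStr i ++ ", " ++ PySem.Int.toStr i))
        ++ ");\n" := by
  simp only [insert_all, pvPairs]
  rw [foldl_append_map, List.map_map]
  have hfun : ∀ i : Int,
      PySem.Str.join ", " (List.foldl (fun (sv : List String) v => sv ++ [PySem.Int.toStr v]) [] [i, i])
        = PySem.Int.toStr i ++ ", " ++ PySem.Int.toStr i := by
    intro i
    show PySem.Str.join ", " [PySem.Int.toStr i, PySem.Int.toStr i] = _
    exact join_pair _ _
  simp only [Function.comp_def, hfun, List.nil_append]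
  apply String.toList_inj.mp
  simp

lemma pvPairs_snoc (s a : Int) (h : s ≤ a) :
    pvPairs s a ++ [[a, a]] = pvPairs s (a + 1) := by
  simp [pvPairs, PySem.List.pyRange_one_succ_right h]

lemma pvPairs_len (s a : Int) : (pvPairs s a).length = (a - s).toNat := by
  simp [pvPairs, PySem.List.length_pyRange_one]

lemma pvLoop (n : Int) : ∀ (k : Nat) (s a : Int) (batch : List String),
    (n + 1 - a).toNat = k → 0 ≤ a - s → a - s < 100000 → (s = a ∨ a ≤ n + 1) →
    pvFlush ((PySem.List.pyRange a (n + 1) 1).foldl genStep (pvPairs s a, batch))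
      = batch ++ (PySem.List.pyRange s (n + 1) 100000).map (chunk_stmt n) := by
  intro k
  induction k with
  | zero =>
    intro s a batch hk h0 hlt hsa
    have hna : n + 1 <= a := by omega
    rw [PySem.List.pyRange_one_eq_nil hna, List.foldl_nil]
    unfold pvFlush
    by_cases hse : s = a
    · subst hse
      rw [if_pos (by simp [pvPairs, PySem.List.pyRange_one_eq_nil (le_refl s)])]
      rw [pyRange_nil_pos s (n + 1) 100000 (by norm_num) (by omega)]
      simp
    · have hsa' : s < a := by omega
      have haeq : a = n + 1 := by rcases hsa with h | h <;> omega
      subst haeq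
      rw [if_neg (by simp [pvPairs, PySem.List.pyRange_one_cons hsa'])]
      rw [pyRange_cons_pos s (n + 1) 100000 (by norm_num) (by omega)]
      rw [pyRange_nil_pos (s + 100000) (n + 1) 100000 (by norm_num) (by omega)]
      rw [insert_all_pairs]
      simp [chunk_stmt, show min (s + 100000) (n + 1) = n + 1 by omega]
  | succ k ih =>
    intro s a batch hk h0 hlt hsa
    have han : a < n + 1 := by omega
    rw [PySem.List.pyRange_one_cons han, List.foldl_cons]
    have hvl : pvPairs s a ++ [[a, a]] = pvPairs s (a + 1) := pvPairs_snoc s a (by omega)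
    have hlen : (pvPairs s (a + 1)).length = (a + 1 - s).toNat := pvPairs_len s (a + 1)
    by_cases hc : a + 1 - s = 100000
    · have hm : (a + 1 - s).toNat % 100000 = 0 := by omega
      have hstep : genStep (pvPairs s a, batch) a
          = (pvPairs (a + 1) (a + 1), batch ++ [insert_all "meal_plan" (pvPairs s (a + 1))]) := by
        simp only [genStep, hvl, hlen]
        simp [pvPairs, PySem.List.pyRange_one_eq_nil (le_refl (a + 1)), hm]
      have hchunk : chunk_stmt n s = insert_all "meal_plan" (pvPairs s (a + 1)) := by
        rw [insert_all_pairs]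
        simp only [chunk_stmt]
        rw [show min (s + 100000) (n + 1) = a + 1 by omega]
      rw [hstep, ih (a + 1) (a + 1) _ (by omega) (by omega) (by omega) (Or.inl rfl)]
      rw [pyRange_cons_pos s (n + 1) 100000 (by norm_num) (by omega)]
      rw [show s + 100000 = a + 1 by omega, List.map_cons, hchunk]
      simp
    · have hm : (a + 1 - s).toNat % 100000 ≠ 0 := by omega
      have hstep : genStep (pvPairs s a, batch) a = (pvPairs s (a + 1), batch) := by
        simp only [genStep, hvl, hlen]
        simp [hm]
      rw [hstep]
      exact ih s (a + 1) batch (by omega) (by omega) (by omega) (Or.inr (by omega))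

-- ===== VERDICT (by name: the statement is the Claim_ definition above) =====
theorem generate_meal_plans_spec : Claim_equal_generate_meal_plans := by
  intro n _
  show generate_meal_plans n = generate_meal_plans_alt n
  have h := pvLoop n (n + 1 - 1).toNat 1 1 [] rfl (by omega) (by omega) (Or.inl rfl)
  simpa [generate_meal_plans, generate_meal_plans_alt, pvFlush, pvPairs,
    PySem.List.pyRange_one_eq_nil (le_refl (1 : Int))] using h
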